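-- pv_equiv track=rewrite | github.com/jquiaot/glowing-winner-leetcode | leetcode/2425__bitwise_xor_of_all_pairings.py | xorAllNums1
-- ===== SOURCE A (Python) =====
-- from typing import List
-- from collections import defaultdict
--
-- def xorAllNums1(nums1: List[int], nums2: List[int]) -> int:
--     """
--     I guess the brute-force method is to just make pairings of nums1
--     and nums2, and then calculate the XOR of the resultant pairings.
--
--     We can count the number of unique pairings (XOR values from nums1
--     and nums2).
--
--     If the count for a particular pairing is even, those pairings would
--     cancel out, resulting in 0.
--
--     If the count for a particular pairing is odd, those pairings would
--     cancel out except for one of them, resulting in that value.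
--     """
--     xorFrequencies = defaultdict(int)
--     for n1 in nums1:
--         for n2 in nums2:
--             xorFrequencies[n1 ^ n2] += 1
--     answer = 0
--     for n, freq in xorFrequencies.items():
--         if freq % 2 == 1:
--             answer ^= n
--     return answer
-- ===== SOURCE B (Python) =====
-- from typing import List
--
-- def xorAllNums1(nums1: List[int], nums2: List[int]) -> int:
--     # Each element of nums1 appears in len(nums2) pairings and vice versa,
--     # so the XOR of all pairings reduces to a parity check on the lengths.
--     x1 = 0
--     for n in nums1:
--         x1 ^= n
--     x2 = 0
--     for n in nums2:
--         x2 ^= n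
--     return (x1 if len(nums2) % 2 == 1 else 0) ^ (x2 if len(nums1) % 2 == 1 else 0)
-- ===== Notes on version B (the rewrite author's own statement) =====
-- stated objective: faster
-- what changed: Replaces the nested loop that counts every pairwise XOR in a dict (then XORs the odd-frequency values) with two linear XOR folds and a length-parity closed form.
import Mathlib
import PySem

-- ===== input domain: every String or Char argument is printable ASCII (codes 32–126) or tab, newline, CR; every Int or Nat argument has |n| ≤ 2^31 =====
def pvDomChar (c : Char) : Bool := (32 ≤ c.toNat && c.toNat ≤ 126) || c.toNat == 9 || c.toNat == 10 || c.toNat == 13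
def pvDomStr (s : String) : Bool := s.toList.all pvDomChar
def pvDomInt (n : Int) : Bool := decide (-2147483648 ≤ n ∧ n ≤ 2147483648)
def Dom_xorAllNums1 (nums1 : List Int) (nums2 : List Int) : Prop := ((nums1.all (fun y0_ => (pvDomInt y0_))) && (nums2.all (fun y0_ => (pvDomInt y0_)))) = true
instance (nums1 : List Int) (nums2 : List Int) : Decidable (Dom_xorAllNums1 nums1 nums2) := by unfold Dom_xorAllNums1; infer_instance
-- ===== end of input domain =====

-- B replaces A's O(n*m) dict of pairwise-XOR frequencies by two linear XOR folds and a length-parity closed form (asymptotically faster).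

-- ===== PORT A =====
def xorAllNums1 (nums1 : List Int) (nums2 : List Int) : Int :=
  let xorFrequencies : PySem.Dict Int Int :=
    nums1.foldl (fun d n1 =>
      nums2.foldl (fun d n2 => d.modify (PySem.Int.bxor n1 n2) 0 (· + 1)) d)
      PySem.Dict.empty
  xorFrequencies.items.foldl
    (fun answer p => if PySem.Int.mod p.2 2 == 1 then PySem.Int.bxor answer p.1 else answer) 0

-- ===== PORT B =====
def xorAllNums1_alt (nums1 : List Int) (nums2 : List Int) : Int :=
  let x1 := nums1.foldl (fun acc n => PySem.Int.bxor acc n) 0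
  let x2 := nums2.foldl (fun acc n => PySem.Int.bxor acc n) 0
  PySem.Int.bxor (if nums2.length % 2 == 1 then x1 else 0)
                 (if nums1.length % 2 == 1 then x2 else 0)

-- ===== PRECONDITION & SPEC =====
def Spec_xorAllNums1 (nums1 : List Int) (nums2 : List Int) (out : Int) : Prop := out = xorAllNums1_alt nums1 nums2
instance (nums1 : List Int) (nums2 : List Int) (out : Int) : Decidable (Spec_xorAllNums1 nums1 nums2 out) := by unfold Spec_xorAllNums1; infer_instance

-- ===== CLAIM (what is proved, stated in full; the proofs are below) =====
def Claim_equal_xorAllNums1 : Prop := ∀ (nums1 : List Int) (nums2 : List Int), Dom_xorAllNums1 nums1 nums2 → Spec_xorAllNums1 nums1 nums2 (xorAllNums1 nums1 nums2)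

-- ===== LEMMAS AND PROOFS =====

-- XOR of a whole list (the accumulator-free view of the folds in both ports)
def xorL (l : List Int) : Int := l.foldl PySem.Int.bxor 0

-- sign-flag/magnitude encoding of an Int, used only to prove associativity of bxor
def pvEnc (x : Int) : Bool × Nat := if 0 ≤ x then (false, x.toNat) else (true, (-x - 1).toNat)
def pvDec (p : Bool × Nat) : Int := if p.1 then -(p.2 : Int) - 1 else (p.2 : Int)

theorem pvEnc_dec (p : Bool × Nat) : pvEnc (pvDec p) = p := by
  rcases p with ⟨f, n⟩
  cases f <;> simp [pvEnc, pvDec] <;> omega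

theorem bxor_eq_dec_enc (a b : Int) :
    PySem.Int.bxor a b =
      pvDec (Bool.xor (pvEnc a).1 (pvEnc b).1, (pvEnc a).2 ^^^ (pvEnc b).2) := by
  unfold PySem.Int.bxor pvEnc pvDec
  split_ifs <;> simp_all

theorem bxor_assoc (a b c : Int) :
    PySem.Int.bxor (PySem.Int.bxor a b) c = PySem.Int.bxor a (PySem.Int.bxor b c) := by
  rw [bxor_eq_dec_enc (PySem.Int.bxor a b) c, bxor_eq_dec_enc a b,
      bxor_eq_dec_enc a (PySem.Int.bxor b c), bxor_eq_dec_enc b c, pvEnc_dec, pvEnc_dec]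
  simp [Bool.xor_assoc, Nat.xor_assoc]

theorem zero_bxor (a : Int) : PySem.Int.bxor 0 a = a := by
  rw [PySem.Int.bxor_comm]; exact PySem.Int.bxor_zero a

theorem bxor_left_comm (a b c : Int) :
    PySem.Int.bxor a (PySem.Int.bxor b c) = PySem.Int.bxor b (PySem.Int.bxor a c) := by
  rw [← bxor_assoc, PySem.Int.bxor_comm a b, bxor_assoc]

theorem bxor_cancel_left (a x : Int) : PySem.Int.bxor a (PySem.Int.bxor a x) = x := by
  rw [← bxor_assoc, PySem.Int.bxor_self, zero_bxor]

theorem foldl_bxor_acc (l : List Int) (acc : Int) :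
    l.foldl PySem.Int.bxor acc = PySem.Int.bxor acc (xorL l) := by
  induction l generalizing acc with
  | nil => simp [xorL, PySem.Int.bxor_zero]
  | cons a t ih =>
      simp only [xorL, List.foldl_cons] at *
      rw [ih (PySem.Int.bxor acc a), ih (PySem.Int.bxor 0 a), zero_bxor, bxor_assoc]

theorem xorL_cons (a : Int) (l : List Int) : xorL (a :: l) = PySem.Int.bxor a (xorL l) := by
  simp only [xorL, List.foldl_cons]
  rw [foldl_bxor_acc, zero_bxor]
  rfl

theorem xorL_replicate_zero (n : Nat) : xorL (List.replicate n (0 : Int)) = 0 := by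
  induction n with
  | zero => rfl
  | succ m ih => simp [List.replicate_succ, xorL_cons, zero_bxor, ih]

theorem xorL_append (l1 l2 : List Int) :
    xorL (l1 ++ l2) = PySem.Int.bxor (xorL l1) (xorL l2) := by
  simp only [xorL, List.foldl_append]
  rw [foldl_bxor_acc]
  rfl

-- the list of all pairings n1 ^ n2, in A's loop order
def pvPairs (nums1 nums2 : List Int) : List Int :=
  nums1.flatMap (fun a => nums2.map (fun b => PySem.Int.bxor a b))

-- A's nested counting loop is the Counter of the pairings list
theorem foldl_nested_counter (nums2 : List Int) :
    ∀ (nums1 : List Int) (d : PySem.Dict Int Int),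
      nums1.foldl (fun d n1 =>
        nums2.foldl (fun d n2 => d.modify (PySem.Int.bxor n1 n2) 0 (· + 1)) d) d
      = (pvPairs nums1 nums2).foldl (fun d x => d.modify x 0 (· + 1)) d := by
  intro nums1
  induction nums1 with
  | nil => intro d; simp [pvPairs]
  | cons a t ih =>
      intro d
      simp only [List.foldl_cons, pvPairs, List.flatMap_cons, List.foldl_append]
      rw [List.foldl_map]
      exact ih _

-- the answer loop over items, accumulator extracted
theorem foldl_items_eq (l : List (Int × Int)) (acc : Int) :
    l.foldl (fun answer p => if PySem.Int.mod p.2 2 == 1 then PySem.Int.bxor answer p.1 else answer) acc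
    = PySem.Int.bxor acc (xorL (l.map (fun p => if PySem.Int.mod p.2 2 == 1 then p.1 else 0))) := by
  induction l generalizing acc with
  | nil => simp [xorL, PySem.Int.bxor_zero]
  | cons p t ih =>
      simp only [List.foldl_cons, List.map_cons]
      rw [ih]
      cases hc : (PySem.Int.mod p.2 2 == 1)
      · simp only [hc, Bool.false_eq_true, if_false]
        rw [xorL_cons, zero_bxor]
      · simp only [hc, if_true]
        rw [xorL_cons, bxor_assoc]

theorem mod2_cast (c : Nat) : PySem.Int.mod (c : Int) 2 = ((c % 2 : Nat) : Int) := by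
  have h := PySem.Int.mod_natCast c 2
  simpa using h

-- flipping one element's contribution flips the XOR by that element
theorem xorL_map_flip (S : List Int) (hS : S.Nodup) (a : Int) (ha : a ∈ S)
    (f g : Int → Int) (hne : ∀ k ∈ S, k ≠ a → g k = f k)
    (hfa : g a = PySem.Int.bxor a (f a)) :
    xorL (S.map g) = PySem.Int.bxor a (xorL (S.map f)) := by
  induction S with
  | nil => cases ha
  | cons s rest ih =>
      rcases List.nodup_cons.mp hS with ⟨hsr, hrest⟩
      by_cases hsa : s = a
      · subst hsa
        have hmaps : rest.map g = rest.map f := by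
          apply List.map_congr_left
          intro k hk
          exact hne k (List.mem_cons_of_mem _ hk) (fun h => hsr (h ▸ hk))
        simp only [List.map_cons, xorL_cons, hmaps,
          hfa, bxor_assoc]
      · have ha' : a ∈ rest := by
          rcases List.mem_cons.mp ha with h | h
          · exact absurd h.symm hsa
          · exact h
        have hgs : g s = f s := hne s List.mem_cons_self hsa
        simp only [List.map_cons, xorL_cons, hgs]
        rw [ih hrest ha' (fun k hk => hne k (List.mem_cons_of_mem _ hk)), bxor_left_comm]

-- XOR over the support weighted by count parity equals XOR over the list
theorem xorL_support (P : List Int) : ∀ (S : List Int), S.Nodup → (∀ x ∈ P, x ∈ S) →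
    xorL (S.map (fun k => if P.count k % 2 == 1 then k else 0)) = xorL P := by
  induction P with
  | nil =>
      intro S _ _
      have hfun : (fun k : Int => if List.count k ([] : List Int) % 2 == 1 then k else 0)
          = fun _ => (0 : Int) := by funext k; simp
      rw [hfun]
      simpa using xorL_replicate_zero S.length
  | cons a t ih =>
      intro S hS hsub
      have hflip := xorL_map_flip S hS a (hsub a List.mem_cons_self)
        (fun k => if t.count k % 2 == 1 then k else 0)
        (fun k => if (a :: t).count k % 2 == 1 then k else 0)
        (by
          intro k _ hk
          simp [List.count_cons, Ne.symm hk])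
        (by
          simp only [List.count_cons_self]
          rcases Nat.mod_two_eq_zero_or_one (t.count a) with h | h
          · have h1 : (t.count a + 1) % 2 = 1 := by omega
            simp [h, h1, PySem.Int.bxor_zero]
          · have h1 : (t.count a + 1) % 2 = 0 := by omega
            simp [h, h1, PySem.Int.bxor_self])
      rw [hflip, ih S hS (fun x hx => hsub x (List.mem_cons_of_mem _ hx)), xorL_cons]

-- XOR of a constant XORed into every element of a list
theorem xorL_map_bxor (a : Int) (l : List Int) :
    xorL (l.map (fun b => PySem.Int.bxor a b))
      = PySem.Int.bxor (if l.length % 2 == 1 then a else 0) (xorL l) := by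
  induction l with
  | nil => simp [xorL, zero_bxor]
  | cons b t ih =>
      simp only [List.map_cons, xorL_cons, ih, List.length_cons]
      rcases Nat.mod_two_eq_zero_or_one t.length with h | h
      · have h1 : (t.length + 1) % 2 = 1 := by omega
        simp only [h, h1]
        norm_num
        rw [zero_bxor, bxor_assoc]
      · have h1 : (t.length + 1) % 2 = 0 := by omega
        simp only [h, h1]
        norm_num
        simp [bxor_assoc, bxor_left_comm, PySem.Int.bxor_comm, bxor_cancel_left,
          PySem.Int.bxor_self, zero_bxor, PySem.Int.bxor_zero]

theorem xorL_pairs (nums1 nums2 : List Int) :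
    xorL (pvPairs nums1 nums2)
      = PySem.Int.bxor (if nums2.length % 2 == 1 then xorL nums1 else 0)
                       (if nums1.length % 2 == 1 then xorL nums2 else 0) := by
  induction nums1 with
  | nil => simp [pvPairs, xorL, PySem.Int.bxor_zero]
  | cons a t ih =>
      simp only [pvPairs, List.flatMap_cons, xorL_append, List.length_cons] at *
      rw [ih, xorL_map_bxor, xorL_cons]
      by_cases hm : (nums2.length % 2 == 1) = true
      · rcases Nat.mod_two_eq_zero_or_one t.length with h | h
        · have h1 : (t.length + 1) % 2 = 1 := by omega
          simp only [hm, h, h1, if_true]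
          norm_num
          simp [bxor_assoc, bxor_left_comm, PySem.Int.bxor_comm, PySem.Int.bxor_zero]
        · have h1 : (t.length + 1) % 2 = 0 := by omega
          simp only [hm, h, h1, if_true]
          norm_num
          simp [bxor_assoc, bxor_left_comm, PySem.Int.bxor_comm, PySem.Int.bxor_zero,
            PySem.Int.bxor_self, zero_bxor, bxor_cancel_left]
      · simp only [Bool.not_eq_true] at hm
        rcases Nat.mod_two_eq_zero_or_one t.length with h | h
        · have h1 : (t.length + 1) % 2 = 1 := by omega
          simp [hm, h, h1, zero_bxor]
        · have h1 : (t.length + 1) % 2 = 0 := by omega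
          simp [hm, h, h1, zero_bxor]

-- ===== VERDICT (by name: the statement is the Claim_ definition above) =====
theorem xorAllNums1_spec : Claim_equal_xorAllNums1 := by
  intro nums1 nums2 _
  unfold Spec_xorAllNums1 xorAllNums1 xorAllNums1_alt
  rw [foldl_nested_counter, ← PySem.Dict.counter_eq_foldl, foldl_items_eq, zero_bxor,
    PySem.Dict.items_counter, List.map_map]
  have hmap : ((fun p : Int × Int => if PySem.Int.mod p.2 2 == 1 then p.1 else 0) ∘
      fun k => (k, ((pvPairs nums1 nums2).count k : Int)))
      = fun k => if (pvPairs nums1 nums2).count k % 2 == 1 then k else 0 := by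
    funext k
    simp only [Function.comp, mod2_cast]
    rcases Nat.mod_two_eq_zero_or_one ((pvPairs nums1 nums2).count k) with h | h <;> simp [h]
  rw [hmap, xorL_support (pvPairs nums1 nums2) (PySem.Set.ofList (pvPairs nums1 nums2))
    (PySem.Set.nodup_ofList _) (fun x hx => (PySem.Set.mem_ofList _ _).mpr hx), xorL_pairs]
  simp only [xorL]
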